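-- pv_equiv track=rewrite | github.com/InstructWare/iwp-tools | iwp_lint/schema_semantics.py | resolve_section_keys
-- ===== SOURCE A (Python) =====
-- def resolve_section_keys(
--     actual_title: str,
--     section_i18n: dict[str, dict[str, list[str]]],
-- ) -> list[str]:
--     matched_by_key: dict[str, int] = {}
--     for section_key, locales in section_i18n.items():
--         titles = [item for names in locales.values() for item in names]
--         matched_lengths = [
--             len(expected_title)
--             for expected_title in titles
--             if _title_match(expected_title, actual_title)
--         ]
--         if matched_lengths:
--             matched_by_key[section_key] = max(matched_lengths)
--     if not matched_by_key:
--         return []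
--     best_len = max(matched_by_key.values())
--     return [
--         section_key for section_key, title_len in matched_by_key.items() if title_len == best_len
--     ]
--
-- def _title_match(expected_title: str, actual_title: str) -> bool:
--     actual = actual_title.strip()
--     return (
--         actual == expected_title
--         or actual.startswith(f"{expected_title}:")
--         or actual.startswith(f"{expected_title} ")
--     )
-- ===== SOURCE B (Python) =====
-- def _title_match(expected_title: str, actual_title: str) -> bool:
--     actual = actual_title.strip()
--     return (
--         actual == expected_title
--         or actual.startswith(f"{expected_title}:")
--         or actual.startswith(f"{expected_title} ")
--     )
--
--
-- def resolve_section_keys(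
--     actual_title: str,
--     section_i18n: dict[str, dict[str, list[str]]],
-- ) -> list[str]:
--     # One pass: no intermediate dict, no flattened title lists; keep a running
--     # best length and the list of keys achieving it.
--     best_len = -1
--     result: list[str] = []
--     for section_key, locales in section_i18n.items():
--         key_best = -1
--         for names in locales.values():
--             for title in names:
--                 if _title_match(title, actual_title) and len(title) > key_best:
--                     key_best = len(title)
--         if key_best < 0:
--             continue
--         if best_len < key_best:
--             best_len = key_best
--             result = [section_key]
--         elif key_best == best_len:
--             result.append(section_key)
--     return result
-- ===== Notes on version B (the rewrite author's own statement) =====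
-- stated objective: simpler
-- what changed: Replaces A's three phases (build a key->max-length dict, take the global max of its values, filter the dict) by a single streaming pass that keeps a running best length and the list of keys achieving it, and replaces the flattened title list plus filtered length list per key by a running per-key maximum.
import Mathlib
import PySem

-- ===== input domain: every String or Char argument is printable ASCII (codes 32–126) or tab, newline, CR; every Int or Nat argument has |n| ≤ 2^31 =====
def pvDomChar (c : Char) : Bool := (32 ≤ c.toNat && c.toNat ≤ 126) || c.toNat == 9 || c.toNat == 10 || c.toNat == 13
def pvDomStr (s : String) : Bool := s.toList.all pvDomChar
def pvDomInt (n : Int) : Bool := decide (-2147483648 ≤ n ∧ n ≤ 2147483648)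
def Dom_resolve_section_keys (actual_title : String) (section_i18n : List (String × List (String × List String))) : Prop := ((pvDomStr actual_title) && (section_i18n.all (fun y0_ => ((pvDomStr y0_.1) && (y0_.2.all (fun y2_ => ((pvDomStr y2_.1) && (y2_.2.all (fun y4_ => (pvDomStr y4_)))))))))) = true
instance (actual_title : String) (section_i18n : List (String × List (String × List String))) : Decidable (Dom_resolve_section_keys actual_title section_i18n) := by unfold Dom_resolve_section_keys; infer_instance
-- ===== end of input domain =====

-- B changes the decomposition only: one streaming pass with a running best length and the
-- list of keys achieving it, instead of A's dict + global max + filter; same results.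

-- shared helper: Python's _title_match, used verbatim by both Source A and Source B
def pyTitleMatch (expected_title : String) (actual_title : String) : Bool :=
  let actual := PySem.Chars.strip actual_title.toList
  (actual == expected_title.toList)
    || PySem.Chars.startswith actual (expected_title.toList ++ [':'])
    || PySem.Chars.startswith actual (expected_title.toList ++ [' '])

-- ===== PORT A =====
def resolve_section_keys (actual_title : String) (section_i18n : List (String × List (String × List String))) : List String :=
  let matched_by_key : List (String × Int) :=
    section_i18n.foldl (fun acc kv =>
      let titles : List String := kv.2.foldl (fun ts nm => ts ++ nm.2) []
      let matched_lengths : List Int :=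
        (titles.filter (fun t => pyTitleMatch t actual_title)).map (fun t => (PySem.Str.len t : Int))
      match PySem.List.max? matched_lengths (fun x => x) with
      | none => acc                                  -- 'if matched_lengths:' fails
      | some m => acc ++ [(kv.1, m)]) []             -- matched_by_key[section_key] = max(...)
  -- 'if not matched_by_key: return []': max? over the values is none exactly then
  match PySem.List.max? (matched_by_key.map (·.2)) (fun x => x) with
  | none => []
  | some best_len => (matched_by_key.filter (fun p => p.2 == best_len)).map (·.1)

-- ===== PORT B =====
def resolve_section_keys_alt (actual_title : String) (section_i18n : List (String × List (String × List String))) : List String :=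
  (section_i18n.foldl (fun (st : Int × List String) kv =>
      let key_best : Int :=
        kv.2.foldl (fun kb nm =>
          nm.2.foldl (fun kb2 title =>
            if pyTitleMatch title actual_title && decide (kb2 < (PySem.Str.len title : Int))
            then (PySem.Str.len title : Int) else kb2) kb) (-1)
      if key_best < 0 then st
      else if st.1 < key_best then (key_best, [kv.1])
      else if key_best == st.1 then (st.1, st.2 ++ [kv.1])
      else st) ((-1 : Int), ([] : List String))).2

-- ===== PRECONDITION & SPEC =====
def Spec_resolve_section_keys (actual_title : String) (section_i18n : List (String × List (String × List String))) (out : List String) : Prop := out = resolve_section_keys_alt actual_title section_i18n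
instance (actual_title : String) (section_i18n : List (String × List (String × List String))) (out : List String) : Decidable (Spec_resolve_section_keys actual_title section_i18n out) := by unfold Spec_resolve_section_keys; infer_instance

-- ===== CLAIM (what is proved, stated in full; the proofs are below) =====
def Claim_equal_resolve_section_keys : Prop := ∀ (actual_title : String) (section_i18n : List (String × List (String × List String))), Dom_resolve_section_keys actual_title section_i18n → Spec_resolve_section_keys actual_title section_i18n (resolve_section_keys actual_title section_i18n)

-- ===== LEMMAS AND PROOFS =====

-- per-section score = B's inner running max: -1 if no title matches, else max matching length
def pvScore (actual_title : String) (locales : List (String × List String)) : Int :=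
  locales.foldl (fun kb nm =>
    nm.2.foldl (fun kb2 title =>
      if pyTitleMatch title actual_title && decide (kb2 < (PySem.Str.len title : Int))
      then (PySem.Str.len title : Int) else kb2) kb) (-1)

-- B's outer step
def pvStep (st : Int × List String) (p : String × Int) : Int × List String :=
  if p.2 < 0 then st
  else if st.1 < p.2 then (p.2, [p.1])
  else if p.2 == st.1 then (st.1, st.2 ++ [p.1])
  else st

def pvPs (actual_title : String) (section_i18n : List (String × List (String × List String))) : List (String × Int) :=
  section_i18n.map (fun kv => (kv.1, pvScore actual_title kv.2))

def pvBest (ps : List (String × Int)) : Int :=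
  ((ps.filter (fun p => decide (0 ≤ p.2))).map (·.2)).foldl max (-1)

-- max(xs) of a nonneg list, as A's max?-match, equals B's running max from -1
theorem pv_foldl_max_nonneg (xs : List Int) (h : ∀ x ∈ xs, 0 ≤ x) :
    xs.foldl max (-1) = (match PySem.List.max? xs (fun x => x) with | none => (-1 : Int) | some m => m) := by
  cases xs with
  | nil => simp [PySem.List.max?]
  | cons x t =>
      rw [PySem.List.max?_id_cons]
      have hx : max (-1 : Int) x = x := max_eq_right (by linarith [h x (by simp)])
      simp [List.foldl_cons, hx]

-- B's per-section score computes A's per-section max?-of-matched-lengths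
theorem pvScore_eq (actual_title : String) (locales : List (String × List String)) :
    pvScore actual_title locales =
      (match PySem.List.max?
          (((locales.foldl (fun ts nm => ts ++ nm.2) []).filter (fun t => pyTitleMatch t actual_title)).map
            (fun t => (PySem.Str.len t : Int))) (fun x => x) with
        | none => (-1 : Int) | some m => m) := by
  rw [PySem.List.foldl_append_eq_flatMap, List.nil_append]
  have h1 : pvScore actual_title locales =
      (locales.flatMap (·.2)).foldl (fun kb2 title =>
        if pyTitleMatch title actual_title && decide (kb2 < (PySem.Str.len title : Int))
        then (PySem.Str.len title : Int) else kb2) (-1) := by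
    unfold pvScore; rw [List.foldl_flatMap]
  have h2 : ∀ (kb2 : Int) (title : String),
      (if pyTitleMatch title actual_title && decide (kb2 < (PySem.Str.len title : Int))
        then (PySem.Str.len title : Int) else kb2)
      = (if pyTitleMatch title actual_title then max kb2 (PySem.Str.len title : Int) else kb2) := by
    intro kb2 title
    cases hm : pyTitleMatch title actual_title <;> simp [max_def]
    omega
  rw [h1]
  have h3 : (locales.flatMap (·.2)).foldl (fun kb2 title =>
        if pyTitleMatch title actual_title && decide (kb2 < (PySem.Str.len title : Int))
        then (PySem.Str.len title : Int) else kb2) (-1)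
      = (locales.flatMap (·.2)).foldl (fun kb2 title =>
        if pyTitleMatch title actual_title then max kb2 (PySem.Str.len title : Int) else kb2) (-1) :=
    PySem.List.foldl_congr_mem _ _ _ _ (fun kb2 title _ => h2 kb2 title)
  rw [h3, PySem.List.foldl_if_eq_foldl_filter, ← List.foldl_map]
  exact pv_foldl_max_nonneg _ (by intro x hx; simp only [List.mem_map] at hx; obtain ⟨t, _, rfl⟩ := hx; exact Int.natCast_nonneg _)

-- B's streaming pass computes "keys achieving the global best", by reverse induction
theorem pv_main (ps : List (String × Int)) :
    ps.foldl pvStep ((-1 : Int), ([] : List String)) =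
      (pvBest ps, (ps.filter (fun p => (p.2 == pvBest ps) && decide (0 ≤ p.2))).map (·.1)) := by
  induction ps using List.reverseRecOn with
  | nil => simp [pvBest]
  | append_singleton ps p ih =>
      have hbound : ∀ q ∈ ps, 0 ≤ q.2 → q.2 ≤ pvBest ps := by
        intro q hq hq0
        exact (PySem.List.le_foldl_max _ _).2 q.2
          (List.mem_map_of_mem (List.mem_filter.mpr ⟨hq, by simpa using hq0⟩))
      have hbest : pvBest (ps ++ [p]) = if p.2 < 0 then pvBest ps else max (pvBest ps) p.2 := by
        unfold pvBest
        rw [List.filter_append, List.map_append, List.foldl_append]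
        by_cases hp : (0 : Int) ≤ p.2
        · simp [hp, if_neg (by omega : ¬ p.2 < 0)]
        · simp [hp, if_pos (by omega : p.2 < 0)]
      rw [List.foldl_append, List.foldl_cons, List.foldl_nil, ih]
      by_cases hneg : p.2 < 0
      · have : pvBest (ps ++ [p]) = pvBest ps := by rw [hbest, if_pos hneg]
        rw [this]
        simp only [pvStep, if_pos hneg, List.filter_append, List.filter_cons,
          List.filter_nil]
        have : ((p.2 == pvBest ps) && decide (0 ≤ p.2)) = false := by
          simp; omega
        simp [this]
      · have h0 : (0 : Int) ≤ p.2 := by omega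
        have hb : pvBest (ps ++ [p]) = max (pvBest ps) p.2 := by rw [hbest, if_neg hneg]
        by_cases hlt : pvBest ps < p.2
        · have hb' : pvBest (ps ++ [p]) = p.2 := by rw [hb]; exact max_eq_right hlt.le
          have hfil : ps.filter (fun q => (q.2 == p.2) && decide (0 ≤ q.2)) = [] := by
            rw [List.filter_eq_nil_iff]
            intro q hq
            simp only [Bool.and_eq_true, beq_iff_eq, decide_eq_true_eq, not_and]
            intro hqe hq0
            exact absurd (hbound q hq hq0) (by omega)
          simp only [pvStep, if_neg (by omega : ¬ p.2 < 0), if_pos hlt, hb',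
            List.filter_append, List.filter_cons, List.filter_nil, hfil]
          simp [h0]
        · have hle : p.2 ≤ pvBest ps := by omega
          have hb' : pvBest (ps ++ [p]) = pvBest ps := by rw [hb]; exact max_eq_left hle
          rw [hb']
          simp only [pvStep, if_neg (by omega : ¬ p.2 < 0), if_neg hlt,
            List.filter_append, List.filter_cons, List.filter_nil]
          by_cases heq : p.2 = pvBest ps
          · have hb0 : (0 : Int) ≤ pvBest ps := heq ▸ h0
            simp [heq, hb0]
          · have : ((p.2 == pvBest ps) && decide (0 ≤ p.2)) = false := by simp [heq]
            simp [beq_iff_eq, heq, this]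

-- B's port, characterized
theorem pvB_char (actual_title : String) (section_i18n : List (String × List (String × List String))) :
    resolve_section_keys_alt actual_title section_i18n =
      (((pvPs actual_title section_i18n).filter
        (fun p => (p.2 == pvBest (pvPs actual_title section_i18n)) && decide (0 ≤ p.2))).map (·.1)) := by
  unfold resolve_section_keys_alt
  have : (section_i18n.foldl (fun (st : Int × List String) kv =>
      let key_best : Int :=
        kv.2.foldl (fun kb nm =>
          nm.2.foldl (fun kb2 title =>
            if pyTitleMatch title actual_title && decide (kb2 < (PySem.Str.len title : Int))
            then (PySem.Str.len title : Int) else kb2) kb) (-1)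
      if key_best < 0 then st
      else if st.1 < key_best then (key_best, [kv.1])
      else if key_best == st.1 then (st.1, st.2 ++ [kv.1])
      else st) ((-1 : Int), ([] : List String)))
      = (pvPs actual_title section_i18n).foldl pvStep ((-1 : Int), ([] : List String)) := by
    unfold pvPs
    rw [List.foldl_map]
    rfl
  rw [this, pv_main]

-- A's matched_by_key is the score-filtered key list
theorem pvA_matched (actual_title : String) (section_i18n : List (String × List (String × List String))) :
    (section_i18n.foldl (fun acc kv =>
      let titles : List String := kv.2.foldl (fun ts nm => ts ++ nm.2) []
      let matched_lengths : List Int :=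
        (titles.filter (fun t => pyTitleMatch t actual_title)).map (fun t => (PySem.Str.len t : Int))
      match PySem.List.max? matched_lengths (fun x => x) with
      | none => acc
      | some m => acc ++ [(kv.1, m)]) ([] : List (String × Int)))
    = (pvPs actual_title section_i18n).filter (fun p => decide (0 ≤ p.2)) := by
  have hstep : ∀ (acc : List (String × Int)) (kv : String × List (String × List String)),
      (let titles : List String := kv.2.foldl (fun ts nm => ts ++ nm.2) []
       let matched_lengths : List Int :=
        (titles.filter (fun t => pyTitleMatch t actual_title)).map (fun t => (PySem.Str.len t : Int))
       match PySem.List.max? matched_lengths (fun x => x) with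
       | none => acc
       | some m => acc ++ [(kv.1, m)])
      = (if decide (0 ≤ pvScore actual_title kv.2) then acc ++ [(kv.1, pvScore actual_title kv.2)] else acc) := by
    intro acc kv
    simp only []
    cases hm : PySem.List.max?
        (((kv.2.foldl (fun ts nm => ts ++ nm.2) []).filter (fun t => pyTitleMatch t actual_title)).map
          (fun t => (PySem.Str.len t : Int))) (fun x => x) with
    | none =>
        have : pvScore actual_title kv.2 = -1 := by rw [pvScore_eq, hm]
        simp [this]
    | some m =>
        have hsc : pvScore actual_title kv.2 = m := by rw [pvScore_eq, hm]
        have hmem := PySem.List.max?_mem hm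
        have hm0 : (0 : Int) ≤ m := by
          simp only [List.mem_map] at hmem
          obtain ⟨t, _, rfl⟩ := hmem
          exact Int.natCast_nonneg _
        simp [hsc, hm0]
  calc (section_i18n.foldl (fun acc kv =>
          let titles : List String := kv.2.foldl (fun ts nm => ts ++ nm.2) []
          let matched_lengths : List Int :=
            (titles.filter (fun t => pyTitleMatch t actual_title)).map (fun t => (PySem.Str.len t : Int))
          match PySem.List.max? matched_lengths (fun x => x) with
          | none => acc
          | some m => acc ++ [(kv.1, m)]) ([] : List (String × Int)))
      = section_i18n.foldl (fun acc kv =>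
          if decide (0 ≤ pvScore actual_title kv.2)
          then acc ++ [(kv.1, pvScore actual_title kv.2)] else acc) [] :=
        PySem.List.foldl_congr_mem _ _ _ _ (fun acc kv _ => hstep acc kv)
    _ = (section_i18n.filter (fun kv => decide (0 ≤ pvScore actual_title kv.2))).map
          (fun kv => (kv.1, pvScore actual_title kv.2)) :=
        PySem.List.foldl_append_if _ _ _ []
    _ = (pvPs actual_title section_i18n).filter (fun p => decide (0 ≤ p.2)) := by
        unfold pvPs
        rw [List.filter_map]
        rfl

-- A's port, characterized: equal to B's characterization
theorem pvA_char (actual_title : String) (section_i18n : List (String × List (String × List String))) :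
    resolve_section_keys actual_title section_i18n =
      (((pvPs actual_title section_i18n).filter
        (fun p => (p.2 == pvBest (pvPs actual_title section_i18n)) && decide (0 ≤ p.2))).map (·.1)) := by
  unfold resolve_section_keys
  rw [pvA_matched]
  set ps := pvPs actual_title section_i18n with hps
  set matched := ps.filter (fun p => decide (0 ≤ p.2)) with hmatched
  have hvals : ∀ x ∈ matched.map (·.2), (0 : Int) ≤ x := by
    intro x hx
    simp only [hmatched, List.mem_map, List.mem_filter] at hx
    obtain ⟨q, ⟨_, hq0⟩, rfl⟩ := hx
    simpa using hq0
  have hbestv : pvBest ps = (matched.map (·.2)).foldl max (-1) := by rw [pvBest, hmatched]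
  have hconj : ps.filter (fun p => (p.2 == pvBest ps) && decide (0 ≤ p.2))
      = matched.filter (fun p => p.2 == pvBest ps) := by
    rw [hmatched, List.filter_filter]
  rw [hconj]
  cases hm : PySem.List.max? (matched.map (·.2)) (fun x => x) with
  | none =>
      have hnil : matched = [] := by
        have := (PySem.List.max?_eq_none_iff (matched.map (·.2)) (fun x => x)).mp hm
        simpa using this
      simp [hnil, PySem.List.max?]
  | some best =>
      have : pvBest ps = best := by
        rw [hbestv, pv_foldl_max_nonneg _ hvals, hm]
      rw [this]
      simp only [hm]

-- ===== VERDICT (by name: the statement is the Claim_ definition above) =====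
theorem resolve_section_keys_spec : Claim_equal_resolve_section_keys := by
  intro actual_title section_i18n _
  unfold Spec_resolve_section_keys
  rw [pvA_char, pvB_char]
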